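-- pv_equiv track=rewrite | github.com/lovit/naver_news_search_scraper | naver_news_search_crawler/makedata.py | group_by_datetime
-- ===== SOURCE A (Python) =====
-- from collections import defaultdict
--
-- def group_by_datetime(paths, monthly=True):
--     key_to_path = defaultdict(lambda: [])
--     for path in paths:
--         if monthly:
--             key = path.split('/')[-1][:7]
--         else:
--             key = path.split('/')[-1][:10]
--         key_to_path[key].append(path)
--     return dict(key_to_path)
-- ===== SOURCE B (Python) =====
-- def group_by_datetime(paths, monthly=True):
--     def keyfn(path):
--         name = path.split('/')[-1]
--         return name[:7] if monthly else name[:10]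
--     keys = list(dict.fromkeys(keyfn(p) for p in paths))
--     return {k: [p for p in paths if keyfn(p) == k] for k in keys}
-- ===== Notes on version B (the rewrite author's own statement) =====
-- stated objective: alternative
-- what changed: Replaces the defaultdict bucket-append loop by first deduplicating the keys in order of first occurrence and then building each group with a filter pass over the paths (dict comprehension), so no mutable buckets are maintained.
import Mathlib
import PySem

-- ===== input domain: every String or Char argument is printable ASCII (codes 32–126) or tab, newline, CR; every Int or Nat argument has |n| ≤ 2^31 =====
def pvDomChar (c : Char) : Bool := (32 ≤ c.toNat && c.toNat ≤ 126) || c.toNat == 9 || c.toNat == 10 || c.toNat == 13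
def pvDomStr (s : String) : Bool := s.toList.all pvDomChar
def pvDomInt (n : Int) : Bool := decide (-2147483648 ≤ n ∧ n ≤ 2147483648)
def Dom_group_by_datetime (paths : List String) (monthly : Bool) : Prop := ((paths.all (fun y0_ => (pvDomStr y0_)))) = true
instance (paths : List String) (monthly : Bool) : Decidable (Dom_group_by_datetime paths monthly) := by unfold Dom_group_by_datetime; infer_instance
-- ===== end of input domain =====

-- B replaces the defaultdict bucket-append loop by an ordered key dedup followed by a
-- filter pass per key (alternative decomposition, same cost class).


-- ===== PORT A =====
-- for path in paths: key = path.split('/')[-1][:7 or 10]; key_to_path[key].append(path)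
-- (split('/') always returns a non-empty list, so the [-1] lookup never fails; .getD "" is unreachable)
def group_by_datetime (paths : List String) (monthly : Bool) : List (String × List String) :=
  (paths.foldl
    (fun d path =>
      let key : String :=
        if monthly then
          PySem.Str.slice (((PySem.List.pyGet? ((PySem.Str.split? path "/").getD []) (-1)).getD "")) none (some 7)
        else
          PySem.Str.slice (((PySem.List.pyGet? ((PySem.Str.split? path "/").getD []) (-1)).getD "")) none (some 10)
      d.modify key [] (fun l => l ++ [path]))
    PySem.Dict.empty).items

-- ===== PORT B =====
-- keyfn(path) = path.split('/')[-1][:7 if monthly else :10]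
def pvKeyB (monthly : Bool) (path : String) : String :=
  let name := (PySem.List.pyGet? ((PySem.Str.split? path "/").getD []) (-1)).getD ""
  if monthly then PySem.Str.slice name none (some 7) else PySem.Str.slice name none (some 10)

-- keys = list(dict.fromkeys(keyfn(p) for p in paths)); {k: [p for p in paths if keyfn(p) == k] for k in keys}
def group_by_datetime_alt (paths : List String) (monthly : Bool) : List (String × List String) :=
  (PySem.List.dedup (paths.map (pvKeyB monthly))).map
    (fun k => (k, paths.filter (fun p => pvKeyB monthly p == k)))

-- ===== PRECONDITION & SPEC =====
def Spec_group_by_datetime (paths : List String) (monthly : Bool) (out : List (String × List String)) : Prop := out = group_by_datetime_alt paths monthly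
instance (paths : List String) (monthly : Bool) (out : List (String × List String)) : Decidable (Spec_group_by_datetime paths monthly out) := by unfold Spec_group_by_datetime; infer_instance

-- ===== CLAIM (what is proved, stated in full; the proofs are below) =====
def Claim_equal_group_by_datetime : Prop := ∀ (paths : List String) (monthly : Bool), Dom_group_by_datetime paths monthly → Spec_group_by_datetime paths monthly (group_by_datetime paths monthly)

-- ===== LEMMAS AND PROOFS =====

-- A's loop body is the modify-by-key loop with key function pvKeyB monthly
theorem pv_A_fold_eq (paths : List String) (monthly : Bool) :
    group_by_datetime paths monthly =
      (paths.foldl (fun d path => d.modify (pvKeyB monthly path) [] (fun l => l ++ [path]))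
        PySem.Dict.empty).items := by
  unfold group_by_datetime pvKeyB
  cases monthly <;> simp

theorem pv_keys_nodup (paths : List String) (monthly : Bool) :
    (paths.foldl (fun d path => d.modify (pvKeyB monthly path) [] (fun l => l ++ [path]))
        (PySem.Dict.empty : PySem.Dict String (List String))).keys.Nodup :=
  PySem.Dict.nodup_keys_foldl_modify_key paths (pvKeyB monthly) []
    (fun _ x l => l ++ [x]) PySem.Dict.empty PySem.Dict.nodup_keys_empty

-- ===== VERDICT (by name: the statement is the Claim_ definition above) =====
theorem group_by_datetime_spec : Claim_equal_group_by_datetime := by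
  intro paths monthly _
  unfold Spec_group_by_datetime group_by_datetime_alt
  rw [pv_A_fold_eq]
  set key := pvKeyB monthly with hk
  set d := paths.foldl (fun d path => d.modify (key path) [] (fun l => l ++ [path]))
      (PySem.Dict.empty : PySem.Dict String (List String)) with hd
  rw [PySem.Dict.items_eq_map_keys d (pv_keys_nodup paths monthly) []]
  have hkeys : d.keys = PySem.List.dedup (paths.map key) := by
    rw [hd, PySem.Dict.keys_foldl_modify_key paths key [] (fun _ x l => l ++ [x])]
    simp [PySem.Dict.keys, PySem.Dict.empty, PySem.Set.update_nil_left]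
  rw [hkeys]
  apply List.map_congr_left
  intro k _
  have hfold : d = (paths.map (fun p => (key p, p))).foldl
      (fun d q => d.modify q.1 [] (fun l => l ++ [q.2])) PySem.Dict.empty := by
    rw [hd, List.foldl_map]
  have := PySem.Dict.getD_foldl_modify_append (paths.map (fun p => (key p, p)))
      (PySem.Dict.empty : PySem.Dict String (List String)) k
  rw [hfold, this]
  simp [List.filter_map, Function.comp_def, List.map_map]
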